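-- pv_equiv track=rewrite | github.com/osmb17/cnstruct_v1 | caltrans_tables.py | _nearest_key
-- ===== SOURCE A (Python) =====
-- def _nearest_key(table: dict, span: int, height: int) -> tuple | None:
--     """Find the nearest (span, height) key in a table."""
--     spans   = sorted({k[0] for k in table})
--     heights = sorted({k[1] for k in table})
--
--     def nearest(lst, val):
--         return min(lst, key=lambda x: abs(x - val))
--
--     s = nearest(spans, span)
--     h = nearest(heights, height)
--     key = (s, h)
--     return key if key in table else None
-- ===== SOURCE B (Python) =====
-- def _nearest_key(table: dict, span: int, height: int) -> tuple | None:
--     """Find the nearest (span, height) key in a table (binary search per axis)."""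
--     span_set, height_set = set(), set()
--     for k in table:
--         span_set.add(k[0])
--         height_set.add(k[1])
--     spans, heights = sorted(span_set), sorted(height_set)
--
--     def nearest(lst, val):
--         lo, hi = 0, len(lst)
--         while lo < hi:
--             mid = (lo + hi) // 2
--             if lst[mid] < val:
--                 lo = mid + 1
--             else:
--                 hi = mid
--         if lo == len(lst):
--             return lst[-1]
--         if lo == 0:
--             return lst[0]
--         left, right = lst[lo - 1], lst[lo]
--         return left if val - left <= right - val else right
--
--     s = nearest(spans, span)
--     h = nearest(heights, height)
--     key = (s, h)
--     return key if key in table else None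
-- ===== Notes on version B (the rewrite author's own statement) =====
-- stated objective: alternative
-- what changed: B builds both axis sets in one pass over the keys and replaces A's linear min-by-distance scan of each sorted axis with a hand-written bisect_left binary search followed by a two-neighbour comparison (ties broken toward the smaller value, as min does).
import Mathlib
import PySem

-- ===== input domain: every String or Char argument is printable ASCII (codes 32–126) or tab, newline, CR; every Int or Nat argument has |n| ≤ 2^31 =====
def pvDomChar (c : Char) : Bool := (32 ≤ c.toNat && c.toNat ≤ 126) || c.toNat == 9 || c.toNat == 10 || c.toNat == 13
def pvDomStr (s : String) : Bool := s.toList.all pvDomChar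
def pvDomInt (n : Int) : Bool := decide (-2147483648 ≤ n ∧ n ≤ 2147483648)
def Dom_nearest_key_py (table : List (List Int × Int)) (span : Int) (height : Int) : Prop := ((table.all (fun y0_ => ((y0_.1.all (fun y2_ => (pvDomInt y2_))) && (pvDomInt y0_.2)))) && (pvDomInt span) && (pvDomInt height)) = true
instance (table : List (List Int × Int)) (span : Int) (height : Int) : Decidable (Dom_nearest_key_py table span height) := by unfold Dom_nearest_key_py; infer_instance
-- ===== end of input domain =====

-- B replaces A's linear min-by-distance scan on each sorted axis with a hand-written binary
-- search (bisect_left) plus a two-neighbour comparison, and builds both axis sets in one pass.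


-- ===== PORT A =====
-- spans = sorted({k[0] for k in table}); heights = sorted({k[1] for k in table});
-- nearest(lst, val) = min(lst, key=lambda x: abs(x - val)); return (s, h) if in table else None.
def nearest_key_py (table : List (List Int × Int)) (span : Int) (height : Int) : Option (List Int) :=
  match (table.map Prod.fst).mapM (fun k => PySem.List.pyGet? k 0) with
  | none => none  -- IndexError from k[0] (excluded by Pre_)
  | some s0 =>
    match (table.map Prod.fst).mapM (fun k => PySem.List.pyGet? k 1) with
    | none => none  -- IndexError from k[1] (excluded by Pre_)
    | some h0 =>
      let spans := PySem.List.sorted (PySem.Set.ofList s0) (fun x => x)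
      let heights := PySem.List.sorted (PySem.Set.ofList h0) (fun x => x)
      match PySem.List.min? spans (fun x => |x - span|), PySem.List.min? heights (fun x => |x - height|) with
      | some s, some h =>
          let key := [s, h]
          if (table.map Prod.fst).contains key then some key else none
      | _, _ => none  -- ValueError: min() of an empty sequence (excluded by Pre_)

-- ===== PORT B =====
-- one pass over the keys building both axis sets
def pvCollect : List (List Int × Int) → PySem.Set Int → PySem.Set Int → Option (PySem.Set Int × PySem.Set Int)
  | [], ss, hs => some (ss, hs)
  | (k, _) :: rest, ss, hs =>
    (PySem.List.pyGet? k 0).bind fun a =>    -- none = IndexError (excluded by Pre_)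
      (PySem.List.pyGet? k 1).bind fun b =>
        pvCollect rest (PySem.Set.add ss a) (PySem.Set.add hs b)

-- the while-loop of Source B's nearest: bisect_left by hand
def pvBisect (lst : List Int) (val : Int) (lo hi : Nat) : Nat :=
  if _h : lo < hi then
    let mid := (lo + hi) / 2
    if lst.getD mid 0 < val then pvBisect lst val (mid + 1) hi else pvBisect lst val lo mid
  else lo
termination_by hi - lo
decreasing_by all_goals omega

def pvNearest (lst : List Int) (val : Int) : Option Int :=
  let lo := pvBisect lst val 0 lst.length
  if lo = lst.length then PySem.List.pyGet? lst (-1)    -- lst[-1]; none = IndexError on [] (excluded by Pre_)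
  else if lo = 0 then PySem.List.pyGet? lst 0
  else
    (PySem.List.pyGet? lst ((lo : Int) - 1)).bind fun left =>
      (PySem.List.pyGet? lst (lo : Int)).bind fun right =>
        some (if val - left ≤ right - val then left else right)

def nearest_key_py_alt (table : List (List Int × Int)) (span : Int) (height : Int) : Option (List Int) :=
  (pvCollect table PySem.Set.empty PySem.Set.empty).bind fun axes =>
    (pvNearest (PySem.List.sorted axes.1 (fun x => x)) span).bind fun s =>
      (pvNearest (PySem.List.sorted axes.2 (fun x => x)) height).bind fun h =>
        if (table.map Prod.fst).contains [s, h] then some [s, h] else none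

-- ===== PRECONDITION & SPEC =====
-- Pre_ excludes exactly the inputs where A raises: an empty table (min() on an empty
-- sequence raises ValueError) and tables with a key of fewer than two components
-- (k[0] or k[1] raises IndexError).
def Pre_nearest_key_py (table : List (List Int × Int)) (_span : Int) (_height : Int) : Prop :=
  table ≠ [] ∧ ∀ p ∈ table, 2 ≤ p.1.length
instance (table : List (List Int × Int)) (span : Int) (height : Int) : Decidable (Pre_nearest_key_py table span height) := by unfold Pre_nearest_key_py; infer_instance

def pvWitness_nearest_key_py : (List (List Int × Int)) × Int × Int := ([([20, 10], 7)], 18, 11)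

def Spec_nearest_key_py (table : List (List Int × Int)) (span : Int) (height : Int) (out : Option (List Int)) : Prop := out = nearest_key_py_alt table span height
instance (table : List (List Int × Int)) (span : Int) (height : Int) (out : Option (List Int)) : Decidable (Spec_nearest_key_py table span height out) := by unfold Spec_nearest_key_py; infer_instance

-- ===== CLAIM (what is proved, stated in full; the proofs are below) =====
def Claim_equal_nearest_key_py : Prop := ∀ (table : List (List Int × Int)) (span : Int) (height : Int), Dom_nearest_key_py table span height → Pre_nearest_key_py table span height → Spec_nearest_key_py table span height (nearest_key_py table span height)

-- ===== LEMMAS AND PROOFS =====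

lemma pg_zero (l : List Int) (h : 0 < l.length) : PySem.List.pyGet? l 0 = some (l[0]'h) := by
  simp only [PySem.List.pyGet?, PySem.List.pyIdx?]
  rw [if_pos (by omega), if_pos (by exact_mod_cast h)]
  simp

lemma pg_one (l : List Int) (h : 1 < l.length) : PySem.List.pyGet? l 1 = some (l[1]'h) := by
  simp only [PySem.List.pyGet?, PySem.List.pyIdx?]
  rw [if_pos (by omega), if_pos (by exact_mod_cast h)]
  simp

lemma pg_nat (l : List Int) (i : Nat) (h : i < l.length) : PySem.List.pyGet? l (i:Int) = some (l[i]) := by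
  simp only [PySem.List.pyGet?, PySem.List.pyIdx?]
  rw [if_pos (by omega), if_pos (by exact_mod_cast h)]
  simp [h]

lemma pg_neg (l : List Int) (h : 0 < l.length) : PySem.List.pyGet? l (-1) = some (l[l.length-1]'(by omega)) := by
  simp only [PySem.List.pyGet?, PySem.List.pyIdx?]
  rw [if_neg (by omega), if_pos (by omega)]
  have h1 : (-(-1:Int)).toNat = 1 := rfl
  rw [h1]
  simp

lemma pg_sub1 (l : List Int) (i : Nat) (h0 : 0 < i) (h : i < l.length) :
    PySem.List.pyGet? l ((i:Int)-1) = some (l[i-1]'(by omega)) := by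
  have h1 : ((i:Int)-1) = ((i-1 : Nat) : Int) := by omega
  rw [h1, pg_nat l (i-1) (by omega)]

-- the values {k[0]}, {k[1]} as plain maps
def pvS0 (table : List (List Int × Int)) : List Int := table.map (fun p => p.1.getD 0 0)
def pvH0 (table : List (List Int × Int)) : List Int := table.map (fun p => p.1.getD 1 0)

lemma mapM_fst (table : List (List Int × Int)) (h : ∀ p ∈ table, 2 ≤ p.1.length) :
    (table.map Prod.fst).mapM (fun k => PySem.List.pyGet? k 0) = some (pvS0 table) := by
  induction table with
  | nil => rfl
  | cons p rest ih =>
    have hp := h p (by simp)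
    have h0 : 0 < p.1.length := by omega
    simp only [List.map_cons, List.mapM_cons, pg_zero p.1 h0, pvS0, List.map_cons]
    rw [ih (fun q hq => h q (by simp [hq]))]
    simp [pvS0, List.getElem?_eq_getElem h0]

lemma mapM_snd (table : List (List Int × Int)) (h : ∀ p ∈ table, 2 ≤ p.1.length) :
    (table.map Prod.fst).mapM (fun k => PySem.List.pyGet? k 1) = some (pvH0 table) := by
  induction table with
  | nil => rfl
  | cons p rest ih =>
    have hp := h p (by simp)
    have h1 : 1 < p.1.length := by omega
    simp only [List.map_cons, List.mapM_cons, pg_one p.1 h1, pvH0, List.map_cons]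
    rw [ih (fun q hq => h q (by simp [hq]))]
    simp [pvH0, List.getElem?_eq_getElem h1]

lemma collect_eq (table : List (List Int × Int)) (h : ∀ p ∈ table, 2 ≤ p.1.length) :
    ∀ ss hs, pvCollect table ss hs = some (PySem.Set.update ss (pvS0 table), PySem.Set.update hs (pvH0 table)) := by
  induction table with
  | nil => intro ss hs; rfl
  | cons p rest ih =>
    intro ss hs
    have hp := h p (by simp)
    have h0 : 0 < p.1.length := by omega
    have h1 : 1 < p.1.length := by omega
    obtain ⟨k, v⟩ := p
    simp only [pvCollect, pg_zero k h0, pg_one k h1, Option.bind_some]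
    rw [ih (fun q hq => h q (by simp [hq]))]
    simp [pvS0, pvH0, PySem.Set.update, List.getElem?_eq_getElem h0, List.getElem?_eq_getElem h1]

-- characterisation shared by both nearest computations (strictly sorted axis list)
def pvIsNearest (l : List Int) (v : Int) (m : Int) : Prop :=
  m ∈ l ∧ ∀ y ∈ l, m = y ∨ |m - v| < |y - v| ∨ (|m - v| = |y - v| ∧ m < y)

lemma pvIsNearest_unique (l : List Int) (v m m' : Int)
    (h : pvIsNearest l v m) (h' : pvIsNearest l v m') : m = m' := by
  rcases h with ⟨hm, hall⟩
  rcases h' with ⟨hm', hall'⟩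
  rcases hall m' hm' with he | hlt | ⟨heq, hlt⟩
  · exact he
  · rcases hall' m hm with he | hlt' | ⟨heq', hlt'⟩ <;> omega
  · rcases hall' m hm with he | hlt' | ⟨heq', hlt'⟩ <;> omega

-- A's min(lst, key=…) fold returns the characterised element on a strictly sorted list
lemma fold_min_char (v : Int) : ∀ (l : List Int) (a : Int), (a :: l).Pairwise (· < ·) →
    pvIsNearest (a :: l) v (l.foldl (fun m x => if |x - v| < |m - v| then x else m) a) := by
  intro l
  induction l with
  | nil =>
    intro a _
    exact ⟨by simp, by intro y hy; simp at hy; subst hy; left; rfl⟩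
  | cons x xs ih =>
    intro a hp
    have hax : a < x := (List.pairwise_cons.mp hp).1 x (by simp)
    have hxxs : (x :: xs).Pairwise (· < ·) := (List.pairwise_cons.mp hp).2
    have haxs : (a :: xs).Pairwise (· < ·) := by
      rw [List.pairwise_cons] at hp hxxs ⊢
      exact ⟨fun y hy => hp.1 y (by simp [hy]), hxxs.2⟩
    simp only [List.foldl_cons]
    by_cases hc : |x - v| < |a - v|
    · rw [if_pos hc]
      obtain ⟨hmem, hall⟩ := ih x hxxs
      refine ⟨List.mem_cons_of_mem a hmem, ?_⟩
      intro y hy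
      rcases List.mem_cons.mp hy with rfl | hy'
      · -- y = a : the result is at least as close as x, hence strictly closer than a
        rcases hall x (by simp) with he | hlt | ⟨heq, _⟩
        · right; left; rw [he]; omega
        · right; left; omega
        · right; left; omega
      · exact hall y hy'
    · rw [if_neg hc]
      obtain ⟨hmem, hall⟩ := ih a haxs
      refine ⟨?_, ?_⟩
      · rcases List.mem_cons.mp hmem with he | hxs
        · rw [he]; exact List.mem_cons_self
        · exact List.mem_cons_of_mem a (List.mem_cons_of_mem x hxs)
      · intro y hy
        rcases List.mem_cons.mp hy with rfl | hy'
        · exact hall y List.mem_cons_self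
        · rcases List.mem_cons.mp hy' with rfl | hyxs
          · -- y = x : result key ≤ a key ≤ x key; ties resolve to the smaller value
            rcases hall a (by simp) with he | hlt | ⟨heq, hlt⟩
            · rw [he]
              rcases lt_or_eq_of_le (not_lt.mp hc) with h | h
              · right; left; omega
              · right; right; exact ⟨by omega, hax⟩
            · right; left; omega
            · rcases lt_or_eq_of_le (not_lt.mp hc) with h | h
              · right; left; omega
              · right; right; constructor <;> omega
          · exact hall y (List.mem_cons_of_mem a hyxs)

lemma min?_cons (key : Int → Int) : ∀ (t : List Int) (a : Int),
    PySem.List.min? (a :: t) key = some (t.foldl (fun m x => if key x < key m then x else m) a) := by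
  intro t
  induction t with
  | nil => intro a; rfl
  | cons x xs ih =>
    intro a
    have h2 := ih (if key x < key a then x else a)
    simp only [PySem.List.min?, List.foldl_cons] at h2 ⊢
    by_cases hc : key x < key a <;> simp [hc] at h2 ⊢ <;> exact h2

lemma min?_char (l : List Int) (v : Int) (hne : l ≠ []) (hp : l.Pairwise (· < ·)) :
    ∃ m, PySem.List.min? l (fun x => |x - v|) = some m ∧ pvIsNearest l v m := by
  obtain ⟨a, t, rfl⟩ := List.exists_cons_of_ne_nil hne
  exact ⟨t.foldl (fun m x => if |x - v| < |m - v| then x else m) a,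
    min?_cons (fun x => |x - v|) t a, fold_min_char v t a hp⟩

-- the binary-search loop: a bisect_left specification
lemma pvBisect_spec (l : List Int) (v : Int) (hp : l.Pairwise (· < ·)) :
    ∀ lo hi, lo ≤ hi → hi ≤ l.length →
    (∀ j, j < lo → ∀ hj : j < l.length, l[j] < v) →
    (∀ j, hi ≤ j → ∀ hj : j < l.length, v ≤ l[j]) →
    pvBisect l v lo hi ≤ l.length ∧
    (∀ j, j < pvBisect l v lo hi → ∀ hj : j < l.length, l[j] < v) ∧
    (∀ j, pvBisect l v lo hi ≤ j → ∀ hj : j < l.length, v ≤ l[j]) := by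
  have hmono : ∀ (i j : Nat) (hi : i < l.length) (hj : j < l.length), i ≤ j → l[i] ≤ l[j] := by
    intro i j hi hj hij
    rcases lt_or_eq_of_le hij with h | h
    · exact le_of_lt (List.pairwise_iff_getElem.mp hp i j hi hj h)
    · subst h; rfl
  intro lo hi
  induction lo, hi using pvBisect.induct l v with
  | case1 lo hi hlt mid hmid ih =>
    intro hle hhi hlo' hhi'
    rw [pvBisect, dif_pos hlt, if_pos (by simpa [mid] using hmid)]
    have hmidlt : mid < l.length := by simp only [mid]; omega
    have hmidv : l[mid] < v := by
      have := List.getD_eq_getElem l 0 hmidlt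
      simp only [mid] at this ⊢; rw [← this]; simpa [mid] using hmid
    exact ih (by simp only [mid]; omega) hhi
      (fun j hj hjl => lt_of_le_of_lt (hmono j mid hjl hmidlt (by simp only [mid] at hj ⊢; omega)) hmidv) hhi'
  | case2 lo hi hlt mid hmid ih =>
    intro hle hhi hlo' hhi'
    rw [pvBisect, dif_pos hlt, if_neg (by simpa [mid] using hmid)]
    have hmidlt : mid < l.length := by simp only [mid]; omega
    have hmidv : v ≤ l[mid] := by
      have := List.getD_eq_getElem l 0 hmidlt
      simp only [mid] at this ⊢; rw [← this]; simpa [mid] using hmid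
    exact ih (by simp only [mid]; omega) (by omega) hlo'
      (fun j hj hjl => le_trans hmidv (hmono mid j hmidlt hjl (by simp only [mid] at hj ⊢; omega)))
  | case3 lo hi hlt =>
    intro hle hhi hlo' hhi'
    rw [pvBisect, dif_neg hlt]
    exact ⟨by omega, hlo', fun j hj hjl => hhi' j (by omega) hjl⟩

lemma pvNearest_char (l : List Int) (v : Int) (hne : l ≠ []) (hp : l.Pairwise (· < ·)) :
    ∃ m, pvNearest l v = some m ∧ pvIsNearest l v m := by
  have hlen : 0 < l.length := List.length_pos_iff.mpr hne
  obtain ⟨hr, hlt, hge⟩ := pvBisect_spec l v hp 0 l.length (by omega) le_rfl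
    (by omega) (by intro j hj hjl; omega)
  set r := pvBisect l v 0 l.length with hrdef
  have hmono : ∀ (i j : Nat) (hi : i < l.length) (hj : j < l.length), i < j → l[i] < l[j] :=
    fun i j hi hj hij => List.pairwise_iff_getElem.mp hp i j hi hj hij
  have habs : ∀ a : Int, |a| = (a.natAbs : Int) := fun a => Int.abs_eq_natAbs a
  by_cases hrl : r = l.length
  · -- every element is < v; the last (largest) element is nearest
    refine ⟨l[l.length - 1]'(by omega), ?_, ?_, ?_⟩
    · simp only [pvNearest, ← hrdef, if_pos hrl]
      exact pg_neg l hlen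
    · exact List.getElem_mem _
    · intro y hy
      obtain ⟨j, hj, rfl⟩ := List.mem_iff_getElem.mp hy
      by_cases hj' : j = l.length - 1
      · subst hj'; left; rfl
      · have h1 : l[j] < l[l.length - 1]'(by omega) := hmono j (l.length - 1) hj (by omega) (by omega)
        have h2 : l[j] < v := hlt j (by omega) hj
        have h3 : l[l.length - 1]'(by omega) < v := hlt (l.length - 1) (by omega) (by omega)
        right; left; rw [habs, habs]; omega
  · by_cases hr0 : r = 0
    · -- every element is ≥ v; the first (smallest) element is nearest
      refine ⟨l[0], ?_, List.getElem_mem _, ?_⟩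
      · simp only [pvNearest, ← hrdef, if_neg hrl, if_pos hr0]
        exact pg_zero l hlen
      · intro y hy
        obtain ⟨j, hj, rfl⟩ := List.mem_iff_getElem.mp hy
        by_cases hj' : j = 0
        · subst hj'; left; rfl
        · have h1 : l[0] < l[j] := hmono 0 j hlen hj (by omega)
          have h2 : v ≤ l[0]'hlen := hge 0 (by omega) hlen
          right; left; rw [habs, habs]; omega
    · -- two candidates l[r-1] < v ≤ l[r]; pick the closer, ties to the left
      have hrlen : r < l.length := by omega
      have hr1 : r - 1 < l.length := by omega
      have hleft : l[r-1] < v := hlt (r-1) (by omega) hr1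
      have hright : v ≤ l[r] := hge r le_rfl hrlen
      refine ⟨if v - l[r-1] ≤ l[r] - v then l[r-1] else l[r], ?_, ?_, ?_⟩
      · simp only [pvNearest, ← hrdef, if_neg hrl, if_neg hr0]
        rw [pg_sub1 l r (by omega) hrlen, pg_nat l r hrlen]
        rfl
      · split <;> exact List.getElem_mem _
      · intro y hy
        obtain ⟨j, hj, rfl⟩ := List.mem_iff_getElem.mp hy
        have hjcase : j ≤ r - 1 ∨ r ≤ j := by omega
        have hlr : l[r-1] < l[r] := hmono (r-1) r hr1 hrlen (by omega)
        rcases hjcase with hjle | hjge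
        · have hyv : l[j] < v := hlt j (by omega) hj
          have hyle : l[j] ≤ l[r-1] := by
            rcases Nat.lt_or_ge j (r-1) with h | h
            · exact le_of_lt (hmono j (r-1) hj hr1 h)
            · have : j = r - 1 := by omega
              subst this; rfl
          by_cases hje : j = r - 1
          · subst hje
            split
            · left; rfl
            · right; left
              rw [habs, habs]; omega
          · have hylt : l[j] < l[r-1] := hmono j (r-1) hj hr1 (by omega)
            right; left
            split <;> (rw [habs, habs]; omega)
        · have hyv : v ≤ l[j] := hge j hjge hj
          have hyge : l[r] ≤ l[j] := by
            rcases Nat.lt_or_ge r j with h | h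
            · exact le_of_lt (hmono r j hrlen hj h)
            · have : j = r := by omega
              subst this; rfl
          by_cases hje : j = r
          · subst hje
            split
            · right
              rename_i hc
              rcases lt_or_eq_of_le hc with h | h
              · left; rw [habs, habs]; omega
              · right; refine ⟨by rw [habs, habs]; omega, hlr⟩
            · left; rfl
          · have hylt : l[r] < l[j] := hmono r j hrlen hj (by omega)
            right; left
            split <;> (rw [habs, habs]; omega)

-- on a nonempty strictly-sorted list the two nearest computations agree
lemma nearest_agree (l : List Int) (v : Int) (hne : l ≠ []) (hp : l.Pairwise (· < ·)) :
    PySem.List.min? l (fun x => |x - v|) = pvNearest l v := by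
  obtain ⟨m, hm, hcm⟩ := min?_char l v hne hp
  obtain ⟨m', hm', hcm'⟩ := pvNearest_char l v hne hp
  rw [hm, hm', pvIsNearest_unique l v m m' hcm hcm']

-- ===== VERDICT (by name: the statement is the Claim_ definition above) =====
theorem nearest_key_py_spec : Claim_equal_nearest_key_py := by
  intro table span height _hdom hpre
  obtain ⟨hne, hlen⟩ := hpre
  unfold Spec_nearest_key_py nearest_key_py nearest_key_py_alt
  rw [mapM_fst table hlen, mapM_snd table hlen, collect_eq table hlen]
  simp only [Option.bind_some]
  have hS : PySem.Set.update PySem.Set.empty (pvS0 table) = PySem.Set.ofList (pvS0 table) := rfl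
  have hH : PySem.Set.update PySem.Set.empty (pvH0 table) = PySem.Set.ofList (pvH0 table) := rfl
  rw [hS, hH]
  have hs0ne : pvS0 table ≠ [] := by
    obtain ⟨p, rest, rfl⟩ := List.exists_cons_of_ne_nil hne
    simp [pvS0]
  have hh0ne : pvH0 table ≠ [] := by
    obtain ⟨p, rest, rfl⟩ := List.exists_cons_of_ne_nil hne
    simp [pvH0]
  have hspne : PySem.List.sorted (PySem.Set.ofList (pvS0 table)) (fun x => x) ≠ [] := by
    intro hc
    rw [PySem.List.sorted_eq_nil_iff] at hc
    obtain ⟨a, t, hat⟩ := List.exists_cons_of_ne_nil hs0ne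
    have ha := (PySem.Set.mem_ofList (pvS0 table) a).mpr (by rw [hat]; simp)
    rw [hc] at ha; simp at ha
  have hhpne : PySem.List.sorted (PySem.Set.ofList (pvH0 table)) (fun x => x) ≠ [] := by
    intro hc
    rw [PySem.List.sorted_eq_nil_iff] at hc
    obtain ⟨a, t, hat⟩ := List.exists_cons_of_ne_nil hh0ne
    have ha := (PySem.Set.mem_ofList (pvH0 table) a).mpr (by rw [hat]; simp)
    rw [hc] at ha; simp at ha
  rw [nearest_agree _ span hspne (PySem.List.sorted_ofList_pairwise_lt (pvS0 table)),
      nearest_agree _ height hhpne (PySem.List.sorted_ofList_pairwise_lt (pvH0 table))]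
  obtain ⟨ms, hms, -⟩ := pvNearest_char _ span hspne (PySem.List.sorted_ofList_pairwise_lt (pvS0 table))
  obtain ⟨mh, hmh, -⟩ := pvNearest_char _ height hhpne (PySem.List.sorted_ofList_pairwise_lt (pvH0 table))
  rw [hms, hmh]
  simp
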